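-- pv_equiv track=rewrite | github.com/nivi1501/Hypercube | hypercube/reKeyed_v1.py | processingKeyBytes
-- ===== SOURCE A (Python) =====
-- BYTE_RANGE = 256
--
-- def processingKeyBytes(key, actual_virtual_to_physical_map):
--     # Initialize a dictionary to store the plaintext-physical node mapping
--
--
--     SelectedKeyBytes = [key[0], key[1]]
--     physical_node_to_plaintext_map_keys = []
--     for keyByte in SelectedKeyBytes:
--      physical_node_to_plaintext_map = {}
--     # Vary the first plaintext byte from 0 to 255
--      for plaintext_byte in range(BYTE_RANGE):
--         # Calculate the virtual node as plaintext XOR key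
--         virtual_node = plaintext_byte ^ keyByte
--
--         # Search for the physical node in the actual mapping using the hidden VN
--         physical_node = None
--         for node, virtuals in actual_virtual_to_physical_map.items():
--             if virtual_node in virtuals:
--                 physical_node = node
--                 #break   # Earlier it was one PN for a VN, but now the attacker needs to check mltiple PNs
--
--                 # Record the plaintext associated with each physical node
--                 if physical_node is not None:
--                     # If the mapping does not exist, create a new entry
--                     if physical_node not in physical_node_to_plaintext_map:
--                         physical_node_to_plaintext_map[physical_node] = [plaintext_byte]
--                     else:
--                         # If the mapping exists, append the plaintext byte
--                         physical_node_to_plaintext_map[physical_node].append(plaintext_byte)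
--      physical_node_to_plaintext_map_keys.append(physical_node_to_plaintext_map)
--     return physical_node_to_plaintext_map_keys
-- ===== SOURCE B (Python) =====
-- BYTE_RANGE = 256
--
-- def processingKeyBytes(key, actual_virtual_to_physical_map):
--     # Build the inverse index virtual_node -> [physical nodes] once (node order,
--     # each node listed at most once per virtual), then answer every plaintext
--     # byte for both key bytes with O(1) lookups.
--     inv = {}
--     for node, virtuals in actual_virtual_to_physical_map.items():
--         seen = set()
--         for v in virtuals:
--             if v not in seen:
--                 seen.add(v)
--                 inv.setdefault(v, []).append(node)
--     result = []
--     for keyByte in (key[0], key[1]):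
--         m = {}
--         for plaintext_byte in range(BYTE_RANGE):
--             for node in inv.get(plaintext_byte ^ keyByte, []):
--                 m.setdefault(node, []).append(plaintext_byte)
--         result.append(m)
--     return result
-- ===== Notes on version B (the rewrite author's own statement) =====
-- stated objective: faster
-- what changed: B precomputes an inverse index virtual_node -> list of physical nodes once and answers each of the 2*256 plaintext bytes with a single dict lookup, instead of A's rescan of every map entry (and membership test over its virtuals) for every (key byte, plaintext byte) pair.
import Mathlib
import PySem

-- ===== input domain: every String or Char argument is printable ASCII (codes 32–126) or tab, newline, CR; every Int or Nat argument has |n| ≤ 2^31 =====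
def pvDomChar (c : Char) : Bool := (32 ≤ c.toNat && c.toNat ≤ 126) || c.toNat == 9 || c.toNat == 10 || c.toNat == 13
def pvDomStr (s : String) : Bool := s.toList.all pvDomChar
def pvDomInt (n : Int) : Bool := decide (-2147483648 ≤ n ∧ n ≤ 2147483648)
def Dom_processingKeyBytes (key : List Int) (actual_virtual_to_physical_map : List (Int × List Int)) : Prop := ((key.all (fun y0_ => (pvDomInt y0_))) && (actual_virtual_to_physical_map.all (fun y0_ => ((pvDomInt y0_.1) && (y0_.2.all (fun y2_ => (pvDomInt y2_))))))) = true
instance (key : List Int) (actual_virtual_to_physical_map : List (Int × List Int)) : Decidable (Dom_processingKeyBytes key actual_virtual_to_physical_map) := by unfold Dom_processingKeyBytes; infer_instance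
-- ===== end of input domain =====

-- B replaces A's inner scan of the whole map per (key byte, plaintext byte) by a
-- virtual-node → physical-nodes inverse index built once; return value only.

-- ===== PORT A =====
-- one key byte: the two nested loops (plaintext byte 0..255, then scan all map items)
def pkbInnerA (keyByte : Int) (items : List (Int × List Int)) : PySem.Dict Int (List Int) :=
  (PySem.List.pyRange 0 256 1).foldl
    (fun d plaintext_byte =>
      let virtual_node := PySem.Int.bxor plaintext_byte keyByte
      items.foldl
        (fun d p =>
          if virtual_node ∈ p.2 then
            -- physical_node = p.1 (never None here); record the plaintext byte
            if ¬ d.contains p.1 then d.insert p.1 [plaintext_byte]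
            else d.modify p.1 [] (fun l => l ++ [plaintext_byte])
          else d)
        d)
    PySem.Dict.empty

def processingKeyBytes (key : List Int) (actual_virtual_to_physical_map : List (Int × List Int)) : List (List (Int × List Int)) :=
  match PySem.List.pyGet? key 0, PySem.List.pyGet? key 1 with
  | some k0, some k1 =>
      let items := (PySem.Dict.ofList actual_virtual_to_physical_map).items
      [k0, k1].foldl (fun acc keyByte => acc ++ [(pkbInnerA keyByte items).items]) []
  | _, _ => []  -- key[0] / key[1] raises IndexError: excluded by Pre_

-- ===== PORT B =====
-- contribution of one map entry (node, virtuals) to the inverse index, with the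
-- per-node 'seen' set deduplicating repeated virtual nodes
def pkbAddNode (node : Int) (inv : PySem.Dict Int (List Int)) (virtuals : List Int) : PySem.Dict Int (List Int) :=
  (virtuals.foldl
    (fun (st : PySem.Dict Int (List Int) × PySem.Set Int) v =>
      if v ∈ st.2 then st
      else (st.1.insert v (st.1.getD v [] ++ [node]), PySem.Set.add st.2 v))
    (inv, PySem.Set.empty)).1

def pkbBuildInv (items : List (Int × List Int)) : PySem.Dict Int (List Int) :=
  items.foldl (fun inv p => pkbAddNode p.1 inv p.2) PySem.Dict.empty

-- one key byte answered by O(1) lookups in the inverse index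
def pkbSolve (inv : PySem.Dict Int (List Int)) (keyByte : Int) : PySem.Dict Int (List Int) :=
  (PySem.List.pyRange 0 256 1).foldl
    (fun m plaintext_byte =>
      (inv.getD (PySem.Int.bxor plaintext_byte keyByte) []).foldl
        (fun m node => m.insert node (m.getD node [] ++ [plaintext_byte])) m)
    PySem.Dict.empty

def processingKeyBytes_alt (key : List Int) (actual_virtual_to_physical_map : List (Int × List Int)) : List (List (Int × List Int)) :=
  match key with
  | k0 :: k1 :: _ =>
      let inv := pkbBuildInv (PySem.Dict.ofList actual_virtual_to_physical_map).items
      [k0, k1].foldl (fun acc keyByte => acc ++ [(pkbSolve inv keyByte).items]) []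
  | _ => []  -- key[0] / key[1] would raise IndexError

-- ===== PRECONDITION & SPEC =====
-- Pre_ excludes only keys of length < 2, on which Python A raises IndexError at key[0]/key[1].
def Pre_processingKeyBytes (key : List Int) (actual_virtual_to_physical_map : List (Int × List Int)) : Prop :=
  2 ≤ key.length
instance (key : List Int) (actual_virtual_to_physical_map : List (Int × List Int)) : Decidable (Pre_processingKeyBytes key actual_virtual_to_physical_map) := by unfold Pre_processingKeyBytes; infer_instance

def pvWitness_processingKeyBytes : List Int × (List (Int × List Int)) := ([3, 7], [(1, [2, 5]), (4, [2])])

def Spec_processingKeyBytes (key : List Int) (actual_virtual_to_physical_map : List (Int × List Int)) (out : List (List (Int × List Int))) : Prop := out = processingKeyBytes_alt key actual_virtual_to_physical_map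
instance (key : List Int) (actual_virtual_to_physical_map : List (Int × List Int)) (out : List (List (Int × List Int))) : Decidable (Spec_processingKeyBytes key actual_virtual_to_physical_map out) := by unfold Spec_processingKeyBytes; infer_instance

-- ===== CLAIM (what is proved, stated in full; the proofs are below) =====
def Claim_equal_processingKeyBytes : Prop := ∀ (key : List Int) (actual_virtual_to_physical_map : List (Int × List Int)), Dom_processingKeyBytes key actual_virtual_to_physical_map → Pre_processingKeyBytes key actual_virtual_to_physical_map → Spec_processingKeyBytes key actual_virtual_to_physical_map (processingKeyBytes key actual_virtual_to_physical_map)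

-- ===== LEMMAS AND PROOFS =====

-- the nodes whose virtual list contains v, in map order
def pkbMatches (items : List (Int × List Int)) (v : Int) : List Int :=
  (items.filter (fun p => decide (v ∈ p.2))).map Prod.fst

-- A's record step equals plain 'insert node (old ++ [pb])'
theorem pkb_step_eq (d : PySem.Dict Int (List Int)) (n pb : Int) :
    (if ¬ d.contains n then d.insert n [pb] else d.modify n [] (fun l => l ++ [pb]))
      = d.insert n (d.getD n [] ++ [pb]) := by
  by_cases h : d.contains n
  · simp [h, PySem.Dict.modify]
  · rw [PySem.Dict.getD_of_not_contains _ _ (by simpa using h)]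
    simp [h]

-- per-node inverse-building loop: what it adds at each virtual node v
theorem pkbAddNode_core (node : Int) (virtuals : List Int)
    (inv : PySem.Dict Int (List Int)) (seen : PySem.Set Int) (v : Int) :
    ((virtuals.foldl
        (fun (st : PySem.Dict Int (List Int) × PySem.Set Int) w =>
          if w ∈ st.2 then st
          else (st.1.insert w (st.1.getD w [] ++ [node]), PySem.Set.add st.2 w))
        (inv, seen)).1).getD v []
      = inv.getD v [] ++ (if v ∈ virtuals ∧ v ∉ seen then [node] else []) := by
  induction virtuals generalizing inv seen with
  | nil => simp
  | cons w ws ih =>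
    simp only [List.foldl_cons]
    by_cases hw : w ∈ seen
    · rw [if_pos hw, ih]
      by_cases hv : v = w
      · subst hv; simp [hw]
      · simp [hv]
    · rw [if_neg hw, ih]
      by_cases hv : v = w
      · subst hv
        simp [PySem.Dict.getD_insert_self, hw]
      · rw [PySem.Dict.getD_insert_of_ne _ _ _ hv]
        simp [PySem.Set.mem_add, hv]

theorem pkbAddNode_getD (node : Int) (virtuals : List Int)
    (inv : PySem.Dict Int (List Int)) (v : Int) :
    (pkbAddNode node inv virtuals).getD v []
      = inv.getD v [] ++ (if v ∈ virtuals then [node] else []) := by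
  unfold pkbAddNode
  rw [pkbAddNode_core]
  simp [PySem.Set.empty]

-- the inverse index answers exactly pkbMatches
theorem pkbBuildInv_getD (items : List (Int × List Int)) (v : Int) :
    (pkbBuildInv items).getD v [] = pkbMatches items v := by
  suffices h : ∀ (inv : PySem.Dict Int (List Int)),
      (items.foldl (fun inv p => pkbAddNode p.1 inv p.2) inv).getD v []
        = inv.getD v [] ++ pkbMatches items v by
    simpa [pkbBuildInv] using h PySem.Dict.empty
  induction items with
  | nil => simp [pkbMatches]
  | cons p ps ih =>
    intro inv
    simp only [List.foldl_cons, ih, pkbAddNode_getD]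
    by_cases hv : v ∈ p.2 <;> simp [pkbMatches, hv]

-- A's inner scan over the whole map = a fold over the matching nodes
theorem pkbInnerA_scan (items : List (Int × List Int)) (v pb : Int)
    (d : PySem.Dict Int (List Int)) :
    items.foldl
        (fun d p =>
          if v ∈ p.2 then
            if ¬ d.contains p.1 then d.insert p.1 [pb]
            else d.modify p.1 [] (fun l => l ++ [pb])
          else d) d
      = (pkbMatches items v).foldl (fun d node => d.insert node (d.getD node [] ++ [pb])) d := by
  induction items generalizing d with
  | nil => simp [pkbMatches]
  | cons p ps ih =>
    by_cases hv : v ∈ p.2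
    · simp only [List.foldl_cons, if_pos hv]
      rw [pkb_step_eq, ih]
      simp [pkbMatches, hv]
    · simp only [List.foldl_cons, if_neg hv]
      rw [ih]
      simp [pkbMatches, hv]

theorem pkbInnerA_eq_solve (keyByte : Int) (items : List (Int × List Int)) :
    pkbInnerA keyByte items = pkbSolve (pkbBuildInv items) keyByte := by
  unfold pkbInnerA pkbSolve
  refine PySem.List.foldl_congr_mem _ _ _ _ (fun d pb _ => ?_)
  rw [pkbBuildInv_getD, pkbInnerA_scan]

-- ===== VERDICT (by name: the statement is the Claim_ definition above) =====
theorem processingKeyBytes_spec : Claim_equal_processingKeyBytes := by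
  intro key m _ hpre
  unfold Pre_processingKeyBytes at hpre
  match key, hpre with
  | k0 :: k1 :: t, _ =>
    unfold Spec_processingKeyBytes processingKeyBytes processingKeyBytes_alt
    simp [PySem.List.pyGet?, PySem.List.pyIdx?, pkbInnerA_eq_solve,
      show (0:Int) ≤ (t.length:Int) + 1 from by positivity]
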